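-- pv_equiv track=rewrite | github.com/anggakawa/teledocker | services/telegram-bot/src/telegram_bot/markdown_to_telegram.py | _convert_blockquotes
-- ===== SOURCE A (Python) =====
-- def _convert_blockquotes(text: str) -> str:
--     """Convert > quoted lines to <blockquote> tags.
--
--     Consecutive > lines are merged into a single blockquote.
--     The leading &gt; (HTML-escaped >) is matched since escaping runs first.
--     """
--     lines = text.split("\n")
--     result_lines: list[str] = []
--     blockquote_lines: list[str] = []
--
--     for line in lines:
--         stripped = line.strip()
--         if stripped.startswith("&gt; "):
--             # Accumulate blockquote content (strip the leading &gt; ).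
--             blockquote_lines.append(stripped[5:])
--         elif stripped == "&gt;":
--             # Empty blockquote line.
--             blockquote_lines.append("")
--         else:
--             if blockquote_lines:
--                 merged = "\n".join(blockquote_lines)
--                 result_lines.append(f"<blockquote>{merged}</blockquote>")
--                 blockquote_lines = []
--             result_lines.append(line)
--
--     # Flush any trailing blockquote.
--     if blockquote_lines:
--         merged = "\n".join(blockquote_lines)
--         result_lines.append(f"<blockquote>{merged}</blockquote>")
--
--     return "\n".join(result_lines)
-- ===== SOURCE B (Python) =====
-- def _convert_blockquotes(text: str) -> str:
--     """Convert > quoted lines to <blockquote> tags (run-scanning rewrite)."""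
--
--     def quote_content(line):
--         # Content of a quoted line, or None if the line is not a quote line.
--         s = line.strip()
--         if s.startswith("&gt; "):
--             return s[5:]
--         if s == "&gt;":
--             return ""
--         return None
--
--     lines = text.split("\n")
--     out = []
--     i = 0
--     n = len(lines)
--     while i < n:
--         c = quote_content(lines[i])
--         if c is None:
--             out.append(lines[i])
--             i += 1
--         else:
--             run = [c]
--             i += 1
--             while i < n:
--                 c = quote_content(lines[i])
--                 if c is None:
--                     break
--                 run.append(c)
--                 i += 1
--             out.append("<blockquote>" + "\n".join(run) + "</blockquote>")
--     return "\n".join(out)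
-- ===== Notes on version B (the rewrite author's own statement) =====
-- stated objective: alternative
-- what changed: Replaces A's flush-on-demand accumulator state machine (pending blockquote buffer flushed inside the non-quote branch and again after the loop) with a run-scanning pass: a quote_content helper classifies a line once, and an inner scan consumes each maximal run of quote lines and emits one blockquote immediately, so no pending state or trailing flush exists.
import Mathlib
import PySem

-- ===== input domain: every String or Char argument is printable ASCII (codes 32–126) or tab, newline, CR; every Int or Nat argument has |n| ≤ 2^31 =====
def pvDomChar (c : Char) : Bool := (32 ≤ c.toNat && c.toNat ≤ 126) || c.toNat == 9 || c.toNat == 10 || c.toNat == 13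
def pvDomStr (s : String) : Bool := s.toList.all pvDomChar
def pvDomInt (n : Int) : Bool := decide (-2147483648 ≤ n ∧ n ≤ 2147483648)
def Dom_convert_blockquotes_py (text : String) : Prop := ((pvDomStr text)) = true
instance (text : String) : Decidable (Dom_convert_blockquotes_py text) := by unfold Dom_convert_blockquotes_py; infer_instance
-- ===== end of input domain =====

-- B replaces A's flush-on-demand accumulator state machine with a run-scanning pass
-- (classify each line once, consume each maximal run of quote lines, emit immediately);
-- same O(n) cost, alternative structure.

-- ===== PORT A =====
def pvA_bq (m : List Char) : List Char :=
  "<blockquote>".toList ++ m ++ "</blockquote>".toList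

-- one iteration of A's for-loop over (result_lines, blockquote_lines)
def pvA_step (st : List (List Char) × List (List Char)) (line : List Char) :
    List (List Char) × List (List Char) :=
  let stripped := PySem.Chars.strip line
  if PySem.Chars.startswith stripped "&gt; ".toList then
    (st.1, st.2 ++ [PySem.Chars.slice stripped (some 5) none])
  else if stripped = "&gt;".toList then
    (st.1, st.2 ++ [[]])
  else
    let res := if st.2 ≠ [] then st.1 ++ [pvA_bq (PySem.Chars.join ['\n'] st.2)] else st.1
    (res ++ [line], [])

def convert_blockquotes_py (text : String) : String :=
  let lines := PySem.Chars.splitOn text.toList ['\n']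
  let st := lines.foldl pvA_step ([], [])
  let res := if st.2 ≠ [] then st.1 ++ [pvA_bq (PySem.Chars.join ['\n'] st.2)] else st.1
  String.ofList (PySem.Chars.join ['\n'] res)

-- ===== PORT B =====
-- quote_content: the content of a quoted line, or none if it is not a quote line
def pvB_qc (line : List Char) : Option (List Char) :=
  let s := PySem.Chars.strip line
  if PySem.Chars.startswith s "&gt; ".toList then some (PySem.Chars.slice s (some 5) none)
  else if s = "&gt;".toList then some []
  else none

-- the inner while loop: contents of the maximal leading run of quote lines, and the rest
def pvB_span : List (List Char) → List (List Char) × List (List Char)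
  | [] => ([], [])
  | l :: ls =>
    match pvB_qc l with
    | some c => (c :: (pvB_span ls).1, (pvB_span ls).2)
    | none => ([], l :: ls)

theorem pvB_span_len : ∀ ls : List (List Char), (pvB_span ls).2.length ≤ ls.length
  | [] => le_refl _
  | l :: ls => by
    simp only [pvB_span]
    cases pvB_qc l with
    | some c => exact le_trans (pvB_span_len ls) (Nat.le_succ _)
    | none => simp

-- the outer while loop
def pvB_go : List (List Char) → List (List Char)
  | [] => []
  | l :: ls =>
    match pvB_qc l with
    | none => l :: pvB_go ls
    | some c =>
      ("<blockquote>".toList ++ PySem.Chars.join ['\n'] (c :: (pvB_span ls).1) ++ "</blockquote>".toList)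
        :: pvB_go (pvB_span ls).2
termination_by ls => ls.length
decreasing_by
  · simp
  · have := pvB_span_len ls; simp; omega

def convert_blockquotes_py_alt (text : String) : String :=
  String.ofList (PySem.Chars.join ['\n'] (pvB_go (PySem.Chars.splitOn text.toList ['\n'])))

-- ===== PRECONDITION & SPEC =====
def Spec_convert_blockquotes_py (text : String) (out : String) : Prop := out = convert_blockquotes_py_alt text
instance (text : String) (out : String) : Decidable (Spec_convert_blockquotes_py text out) := by unfold Spec_convert_blockquotes_py; infer_instance

-- ===== CLAIM (what is proved, stated in full; the proofs are below) =====
def Claim_equal_convert_blockquotes_py : Prop := ∀ (text : String), Dom_convert_blockquotes_py text → Spec_convert_blockquotes_py text (convert_blockquotes_py text)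

-- ===== LEMMAS AND PROOFS =====

-- A's final flush
def pvFlush (st : List (List Char) × List (List Char)) : List (List Char) :=
  if st.2 ≠ [] then st.1 ++ [pvA_bq (PySem.Chars.join ['\n'] st.2)] else st.1

-- A's loop seen from a pending accumulator
def pvCont (acc : List (List Char)) : List (List Char) → List (List Char)
  | [] => if acc = [] then [] else [pvA_bq (PySem.Chars.join ['\n'] acc)]
  | l :: ls =>
    match pvB_qc l with
    | some c => pvCont (acc ++ [c]) ls
    | none =>
      (if acc = [] then [] else [pvA_bq (PySem.Chars.join ['\n'] acc)]) ++ l :: pvCont [] ls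

theorem pvA_step_eq (st : List (List Char) × List (List Char)) (l : List Char) :
    pvA_step st l =
      match pvB_qc l with
      | some c => (st.1, st.2 ++ [c])
      | none => (pvFlush st ++ [l], []) := by
  simp only [pvA_step, pvB_qc, pvFlush]
  split_ifs <;> rfl

theorem pvFlush_eq (res acc : List (List Char)) :
    pvFlush (res, acc) =
      res ++ (if acc = [] then [] else [pvA_bq (PySem.Chars.join ['\n'] acc)]) := by
  simp [pvFlush]; split_ifs <;> simp

theorem pvFoldl_cont : ∀ (lines : List (List Char)) (res acc : List (List Char)),
    pvFlush (lines.foldl pvA_step (res, acc)) = res ++ pvCont acc lines := by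
  intro lines
  induction lines with
  | nil => intro res acc; simp [pvCont, pvFlush_eq]
  | cons l ls ih =>
    intro res acc
    simp only [List.foldl_cons, pvA_step_eq]
    cases hq : pvB_qc l with
    | some c => simp only [pvCont, hq, ih]
    | none => simp [pvCont, hq, ih, pvFlush_eq]

theorem pvCont_go : ∀ (ls : List (List Char)) (pre : List (List Char)),
    pvCont pre ls =
      if pre = [] then pvB_go ls
      else pvA_bq (PySem.Chars.join ['\n'] (pre ++ (pvB_span ls).1)) :: pvB_go (pvB_span ls).2 := by
  intro ls
  induction ls with
  | nil =>
    intro pre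
    by_cases h : pre = [] <;> simp [pvCont, pvB_span, pvB_go, h]
  | cons l ls ih =>
    intro pre
    cases hq : pvB_qc l with
    | some c =>
      have hne : pre ++ [c] ≠ [] := by simp
      by_cases h : pre = []
      · simp [pvCont, hq, ih, h, pvB_go, pvA_bq]
      · simp [pvCont, hq, ih, h, pvB_span]
    | none =>
      by_cases h : pre = []
      · simp [pvCont, hq, ih, h, pvB_go]
      · simp [pvCont, hq, ih, h, pvB_span, pvB_go, pvA_bq]

-- ===== VERDICT (by name: the statement is the Claim_ definition above) =====
theorem convert_blockquotes_py_spec : Claim_equal_convert_blockquotes_py := by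
  intro text _
  unfold Spec_convert_blockquotes_py convert_blockquotes_py convert_blockquotes_py_alt
  have h := pvFoldl_cont (PySem.Chars.splitOn text.toList ['\n']) [] []
  rw [pvCont_go, if_pos rfl] at h
  simp only [pvFlush] at h
  simp only [List.nil_append] at h
  exact congrArg (fun r => String.ofList (PySem.Chars.join ['\n'] r)) h
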